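-- pv_equiv track=rewrite | github.com/irenicquasar/Systems_for_Machine_Learning | Assgn_2/q3_a.py | split_heads
-- ===== SOURCE A (Python) =====
-- def split_heads(X, num_heads):
--     """
--     Split X of shape (seq_len, d_model) into (num_heads, seq_len, head_dim).
--     head_dim = d_model // num_heads.
--     """
--     seq_len = len(X)
--     d_model = len(X[0])
--     head_dim = d_model // num_heads
--     heads = []
--     for h in range(num_heads):
--         head_matrix = []
--         for i in range(seq_len):
--             # slice from h*head_dim to (h+1)*head_dim
--             head_matrix.append(X[i][h*head_dim : (h+1)*head_dim])
--         heads.append(head_matrix)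
--     return heads
-- ===== SOURCE B (Python) =====
-- def split_heads(X, num_heads):
--     """
--     Split X of shape (seq_len, d_model) into (num_heads, seq_len, head_dim).
--     Different decomposition: chunk each row into its per-head slices (one pass
--     over rows), then transpose the seq_len x num_heads grid with zip(*...).
--     """
--     head_dim = len(X[0]) // num_heads
--     grid = [[row[h*head_dim:(h+1)*head_dim] for h in range(num_heads)] for row in X]
--     return [list(col) for col in zip(*grid)]
-- ===== Notes on version B (the rewrite author's own statement) =====
-- stated objective: alternative
-- what changed: B chunks each row into its num_heads contiguous slices in one pass over the rows, building a seq_len x num_heads grid, then transposes the grid with zip(*grid), instead of A's head-major nested index loops.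
import Mathlib
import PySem

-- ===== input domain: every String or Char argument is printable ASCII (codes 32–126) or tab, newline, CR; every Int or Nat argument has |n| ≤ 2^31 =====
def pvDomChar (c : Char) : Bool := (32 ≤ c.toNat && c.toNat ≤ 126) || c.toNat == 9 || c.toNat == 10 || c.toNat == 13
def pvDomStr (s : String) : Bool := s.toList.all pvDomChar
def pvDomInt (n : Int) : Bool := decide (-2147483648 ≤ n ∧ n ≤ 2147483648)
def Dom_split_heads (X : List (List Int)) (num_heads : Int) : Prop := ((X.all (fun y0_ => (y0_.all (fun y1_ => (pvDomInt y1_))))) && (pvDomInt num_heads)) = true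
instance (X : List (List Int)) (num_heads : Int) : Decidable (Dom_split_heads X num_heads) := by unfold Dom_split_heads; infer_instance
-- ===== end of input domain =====

-- B chunks each row into its per-head slices, then transposes the grid with zip(*grid);
-- A iterates head-major with nested index loops. Same value everywhere both return.

-- ===== PORT A =====
def split_heads (X : List (List Int)) (num_heads : Int) : List (List (List Int)) :=
  let seq_len : Int := X.length
  let d_model : Int := (PySem.List.pyGetD X 0 []).length  -- X[0]; Pre_ requires X ≠ []
  let head_dim : Int := PySem.Int.floordiv d_model num_heads
  (PySem.List.pyRange 0 num_heads 1).foldl (fun heads h =>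
    heads ++ [(PySem.List.pyRange 0 seq_len 1).foldl (fun hm i =>
      hm ++ [PySem.List.slice (PySem.List.pyGetD X i [])
               (some (h * head_dim)) (some ((h + 1) * head_dim))]) []]) []

-- ===== PORT B =====
-- zip(*rows): pull the head of every remaining row, or stop (faithful zip semantics)
def pvTakeHeads {α : Type} : List (List α) → Option (List α × List (List α))
  | [] => some ([], [])
  | [] :: _ => none
  | (a :: as) :: rs => (pvTakeHeads rs).map (fun p => (a :: p.1, as :: p.2))

def pvZipGo {α : Type} : List α → List (List α) → List (List α)
  | [], _ => []
  | a :: as, rs =>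
    match pvTakeHeads rs with
    | none => []
    | some (hs, ts) => (a :: hs) :: pvZipGo as ts

def pvZipStar {α : Type} : List (List α) → List (List α)
  | [] => []
  | r :: rs => pvZipGo r rs

def split_heads_alt (X : List (List Int)) (num_heads : Int) : List (List (List Int)) :=
  let head_dim : Int := PySem.Int.floordiv ((PySem.List.pyGetD X 0 []).length) num_heads
  let grid := X.map (fun row => (PySem.List.pyRange 0 num_heads 1).map (fun h =>
    PySem.List.slice row (some (h * head_dim)) (some ((h + 1) * head_dim))))
  pvZipStar grid

-- ===== PRECONDITION & SPEC =====
-- Pre_ excludes exactly the inputs where Python A raises: X = [] (IndexError on X[0])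
-- and num_heads = 0 (ZeroDivisionError).
def Pre_split_heads (X : List (List Int)) (num_heads : Int) : Prop := X ≠ [] ∧ num_heads ≠ 0
instance (X : List (List Int)) (num_heads : Int) : Decidable (Pre_split_heads X num_heads) := by unfold Pre_split_heads; infer_instance

def pvWitness_split_heads : List (List Int) × Int := ([[1, 2, 3, 4], [5, 6, 7, 8]], 2)

def Spec_split_heads (X : List (List Int)) (num_heads : Int) (out : List (List (List Int))) : Prop := out = split_heads_alt X num_heads
instance (X : List (List Int)) (num_heads : Int) (out : List (List (List Int))) : Decidable (Spec_split_heads X num_heads out) := by unfold Spec_split_heads; infer_instance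

-- ===== CLAIM (what is proved, stated in full; the proofs are below) =====
def Claim_equal_split_heads : Prop := ∀ (X : List (List Int)) (num_heads : Int), Dom_split_heads X num_heads → Pre_split_heads X num_heads → Spec_split_heads X num_heads (split_heads X num_heads)

-- ===== LEMMAS AND PROOFS =====

-- A's ports as maps: inner loop appends X[i]'s slice for i = 0..len(X)-1, i.e. maps over X
theorem split_heads_eq_map (X : List (List Int)) (num_heads : Int) :
    split_heads X num_heads =
      (PySem.List.pyRange 0 num_heads 1).map (fun h => X.map (fun row =>
        PySem.List.slice row
          (some (h * PySem.Int.floordiv ((PySem.List.pyGetD X 0 []).length) num_heads))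
          (some ((h + 1) * PySem.Int.floordiv ((PySem.List.pyGetD X 0 []).length) num_heads)))) := by
  unfold split_heads
  rw [PySem.List.foldl_append_singleton_eq_map]
  refine List.map_congr_left (fun h _ => ?_)
  rw [PySem.List.foldl_pyRange_zero_pyGetD' X []
        (fun acc row => acc ++ [PySem.List.slice row
          (some (h * PySem.Int.floordiv ((PySem.List.pyGetD X 0 []).length) num_heads))
          (some ((h + 1) * PySem.Int.floordiv ((PySem.List.pyGetD X 0 []).length) num_heads))]) [],
      PySem.List.foldl_append_singleton_eq_map]
  simp

theorem pvTakeHeads_map {α β : Type} (f' : β → α) (f'' : β → List α) :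
    ∀ rest : List β,
      pvTakeHeads (rest.map (fun r => f' r :: f'' r)) = some (rest.map f', rest.map f'') := by
  intro rest
  induction rest with
  | nil => rfl
  | cons r rs ih => simp [pvTakeHeads, ih]

theorem pvZipGo_map {α β : Type} (g : β → Int → α) :
    ∀ (hs : List Int) (r : β) (rest : List β),
      pvZipGo (hs.map (g r)) (rest.map (fun r' => hs.map (g r'))) =
        hs.map (fun h => g r h :: rest.map (fun r' => g r' h)) := by
  intro hs
  induction hs with
  | nil => intro r rest; rfl
  | cons h hs ih =>
    intro r rest
    simp only [List.map_cons, pvZipGo]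
    rw [pvTakeHeads_map (fun r' => g r' h) (fun r' => hs.map (g r'))]
    simp only [ih]

-- ===== VERDICT (by name: the statement is the Claim_ definition above) =====
theorem split_heads_spec : Claim_equal_split_heads := by
  intro X num_heads _ hpre
  unfold Spec_split_heads
  rw [split_heads_eq_map]
  unfold split_heads_alt
  obtain ⟨hne, -⟩ := hpre
  obtain ⟨r, rest, rfl⟩ := List.exists_cons_of_ne_nil hne
  simp only [List.map_cons, pvZipStar]
  rw [pvZipGo_map (g := fun row h =>
    PySem.List.slice row
      (some (h * PySem.Int.floordiv ((PySem.List.pyGetD (r :: rest) 0 []).length) num_heads))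
      (some ((h + 1) * PySem.Int.floordiv ((PySem.List.pyGetD (r :: rest) 0 []).length) num_heads)))]
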